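-- pv_equiv track=rewrite | github.com/huqiwen1023/advent_of_code_2015 | 2015_day1.py | day1_part1
-- ===== SOURCE A (Python) =====
-- def day1_part1(input_text):
--     count = 0
--     for s in input_text:
--         if s == '(':
--             count += 1
--         elif s == ')':
--             count -= 1
--     return count
-- ===== SOURCE B (Python) =====
-- def day1_part1(input_text):
--     return input_text.count('(') - input_text.count(')')
-- ===== Notes on version B (the rewrite author's own statement) =====
-- stated objective: idiomatic
-- what changed: Replaces the manual +1/-1 accumulator loop with two str.count library scans and a subtraction.
import Mathlib
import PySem

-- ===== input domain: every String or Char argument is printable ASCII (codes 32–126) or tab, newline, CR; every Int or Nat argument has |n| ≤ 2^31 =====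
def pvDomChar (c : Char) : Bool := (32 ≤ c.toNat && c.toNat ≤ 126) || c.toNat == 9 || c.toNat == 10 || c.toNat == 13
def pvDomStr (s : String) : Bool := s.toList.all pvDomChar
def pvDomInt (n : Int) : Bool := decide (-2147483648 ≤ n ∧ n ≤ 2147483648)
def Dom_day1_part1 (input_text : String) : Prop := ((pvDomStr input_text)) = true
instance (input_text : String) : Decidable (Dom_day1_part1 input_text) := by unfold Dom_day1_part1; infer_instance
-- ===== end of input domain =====

-- B replaces A's single +1/-1 accumulator loop with two library counting passes (str.count); idiomatic, same cost.

-- ===== PORT A =====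
def day1_part1 (input_text : String) : Int :=
  input_text.toList.foldl
    (fun count s =>
      if s == '(' then count + 1
      else if s == ')' then count - 1
      else count)
    0

-- ===== PORT B =====
def day1_part1_alt (input_text : String) : Int :=
  (PySem.Str.count input_text "(" : Int) - (PySem.Str.count input_text ")" : Int)

-- ===== PRECONDITION & SPEC =====
def Spec_day1_part1 (input_text : String) (out : Int) : Prop := out = day1_part1_alt input_text
instance (input_text : String) (out : Int) : Decidable (Spec_day1_part1 input_text out) := by unfold Spec_day1_part1; infer_instance

-- ===== CLAIM (what is proved, stated in full; the proofs are below) =====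
def Claim_equal_day1_part1 : Prop := ∀ (input_text : String), Dom_day1_part1 input_text → Spec_day1_part1 input_text (day1_part1 input_text)

-- ===== LEMMAS AND PROOFS =====

-- str.count with a single-character needle is List.count
theorem chars_count_go_singleton (c : Char) (fuel : Nat) :
    ∀ (s : List Char) (acc : Nat), s.length ≤ fuel →
      PySem.Chars.count.go [c] fuel s acc = acc + s.count c := by
  induction fuel with
  | zero =>
    intro s acc h
    cases s with
    | nil => simp [PySem.Chars.count.go]
    | cons a t => simp at h
  | succ n ih =>
    intro s acc h
    cases s with
    | nil => simp [PySem.Chars.count.go]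
    | cons a t =>
      simp only [List.length_cons, Nat.succ_le_succ_iff] at h
      by_cases hc : c = a
      · subst hc
        simp [PySem.Chars.count.go, List.isPrefixOf, ih t _ h]
        omega
      · have : ¬ ([c].isPrefixOf (a :: t) = true) := by
          simp [List.isPrefixOf, hc]
        simp [PySem.Chars.count.go, this, ih t _ h, List.count_cons]
        simp [Ne.symm hc]

theorem chars_count_singleton (s : List Char) (c : Char) :
    PySem.Chars.count s [c] = s.count c := by
  simp only [PySem.Chars.count, List.isEmpty_cons, Bool.false_eq_true, ↓reduceIte]
  exact chars_count_go_singleton c s.length s 0 (le_refl _) |>.trans (Nat.zero_add _ ▸ rfl)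

theorem foldl_paren (l : List Char) (a : Int) :
    l.foldl (fun count s => if s == '(' then count + 1 else if s == ')' then count - 1 else count) a
      = a + (l.count '(' : Int) - (l.count ')' : Int) := by
  induction l generalizing a with
  | nil => simp
  | cons x t ih =>
    simp only [List.foldl_cons, ih, List.count_cons]
    by_cases h1 : x = '('
    · simp [h1]; ring
    · by_cases h2 : x = ')'
      · simp [h2]; ring
      · simp [h1, h2]

-- ===== VERDICT (by name: the statement is the Claim_ definition above) =====
theorem day1_part1_spec : Claim_equal_day1_part1 := by
  intro s _
  unfold Spec_day1_part1 day1_part1 day1_part1_alt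
  have h1 : PySem.Str.count s "(" = s.toList.count '(' := by
    simp [PySem.Str.count_eq]
    exact chars_count_singleton _ _
  have h2 : PySem.Str.count s ")" = s.toList.count ')' := by
    simp [PySem.Str.count_eq]
    exact chars_count_singleton _ _
  rw [h1, h2, foldl_paren]
  ring
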